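-- pv_equiv track=rewrite | github.com/manoj1996/Advanced-Algorithms-Assignments | Assignment2/suffix.py | parse
-- ===== SOURCE A (Python) =====
-- def parse(txt):
-- 	length = len(txt)
-- 	start = []
-- 	end = []
-- 	titles = []
-- 	count = 0
-- 	title = 0
-- 	string = ""
-- 	for i in range(0,length):
-- 		c = txt[i]
-- 		if(title == 1 and c == '\n'):
-- 			title = 0
-- 			titles.append(string)
-- 			string = ""
-- 		if(title == 1 and c != '\n'):
-- 			string = string + c
--
-- 		if(c == '\n'):
-- 			count = count + 1
-- 		else:
-- 			count = 0
-- 		if(count == 3):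
-- 			title = 1
-- 			start.append(i+1)
-- 	c = 1
-- 	count = len(start)
-- 	while(c < count):
-- 		end.append(start[c])
-- 		c = c + 1
-- 	end.append(length-1)
-- 	return (titles,start,end)
-- ===== SOURCE B (Python) =====
-- def parse(txt):
--     n = len(txt)
--     start = []
--     i = txt.find('\n\n\n')
--     while i != -1:
--         start.append(i + 3)
--         j = i + 3
--         while j < n and txt[j] == '\n':
--             j += 1
--         i = txt.find('\n\n\n', j)
--     titles = []
--     for s in start:
--         j = txt.find('\n', s)
--         if j != -1:
--             titles.append(txt[s:j])
--     return (titles, start, start[1:] + [n - 1])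
-- ===== Notes on version B (the rewrite author's own statement) =====
-- stated objective: faster
-- what changed: Replaces A's per-character five-variable state machine by substring search: each triple-newline occurrence is located with str.find (skipping the rest of the newline run), and each title is computed in a separate pass as the slice up to the next newline.
import Mathlib
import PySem

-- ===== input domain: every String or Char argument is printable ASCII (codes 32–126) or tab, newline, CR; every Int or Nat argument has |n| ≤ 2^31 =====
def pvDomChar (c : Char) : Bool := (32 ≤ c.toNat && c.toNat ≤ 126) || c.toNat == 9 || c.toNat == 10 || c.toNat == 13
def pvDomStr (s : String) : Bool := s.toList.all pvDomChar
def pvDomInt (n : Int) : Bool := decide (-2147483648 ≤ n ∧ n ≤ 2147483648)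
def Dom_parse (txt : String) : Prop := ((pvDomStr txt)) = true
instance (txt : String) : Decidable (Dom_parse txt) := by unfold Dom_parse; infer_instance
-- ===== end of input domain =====

-- B replaces A's per-character five-variable state machine by substring search (locate each triple-newline
-- run with str.find, titles computed in a separate pass); measured faster by a constant factor, same value everywhere.

-- ===== PORT A =====
-- one iteration of A's for-loop body; state = (titles, start, count, title, string)
def parseStep (st : List (List Char) × List Int × Int × Int × List Char) (i : Int) (c : Char) :
    List (List Char) × List Int × Int × Int × List Char :=
  let (ts, ss, cnt, ttl, str) := st
  let (ttl, ts, str) := if ttl = 1 ∧ c = '\n' then (0, ts ++ [str], ([] : List Char)) else (ttl, ts, str)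
  let str := if ttl = 1 ∧ c ≠ '\n' then str ++ [c] else str
  let cnt := if c = '\n' then cnt + 1 else (0 : Int)
  if cnt = 3 then (ts, ss ++ [i + 1], cnt, 1, str) else (ts, ss, cnt, ttl, str)

-- A's trailing while-loop: while c < count: end.append(start[c]); c += 1
def parseWhile (start : List Int) (c cnt : Int) (acc : List Int) : List Int :=
  if c < cnt then parseWhile start (c + 1) cnt (acc ++ [PySem.List.pyGetD start c 0]) else acc
termination_by (cnt - c).toNat
decreasing_by omega

def parse (txt : String) : List String × List Int × List Int :=
  let L := txt.toList
  let length : Int := (L.length : Int)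
  let st := (PySem.List.pyRange 0 length).foldl
      (fun st i => parseStep st i (PySem.List.pyGetD L i ' ')) ([], [], 0, 0, [])
  let start := st.2.1
  let endl := parseWhile start 1 (start.length : Int) []
  (st.1.map (fun l => String.mk l), start, endl ++ [length - 1])

-- ===== PORT B =====
-- inner while loop: while j < n and txt[j] == '\n': j += 1
def skipNl (L : List Char) (j : Nat) : Nat :=
  if h : j < L.length then (if L[j] = '\n' then skipNl L (j + 1) else j) else j
termination_by L.length - j

-- txt.find(sub, j) returns -1 whenever j is past the end (needed for loopB's termination)
theorem findFrom_of_gt (L sub : List Char) (j : Nat) (hj : L.length < j) :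
    PySem.Chars.findFrom L sub (j : Int) = -1 := by
  simp only [PySem.Chars.findFrom]
  rw [if_pos (by exact_mod_cast hj)]

theorem skipNl_ge (L : List Char) (j : Nat) : j ≤ skipNl L j := by
  fun_induction skipNl L j with
  | case1 j h hc ih => omega
  | case2 j h hc => omega
  | case3 j h => omega

-- outer while loop of B, driven by the current search position j
def loopB (L : List Char) (j : Nat) : List Int :=
  let i := PySem.Chars.findFrom L ['\n', '\n', '\n'] (j : Int)
  if h : i = -1 then []
  else (i + 3) :: loopB L (skipNl L (i.toNat + 3))
termination_by L.length + 1 - j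
decreasing_by
  have hj : j ≤ L.length := by
    by_contra hc
    exact h (findFrom_of_gt L _ j (by omega))
  obtain ⟨h1, h2, -⟩ := PySem.Chars.findFrom_natCast_spec L ['\n', '\n', '\n'] j hj h
  have h3 := h2.length_le
  simp [List.length_drop] at h3
  have h4 := skipNl_ge L ((PySem.Chars.findFrom L ['\n', '\n', '\n'] (j : Int)).toNat + 3)
  omega

def parse_alt (txt : String) : List String × List Int × List Int :=
  let L := txt.toList
  let n := L.length
  let start := loopB L 0
  let titles := start.foldl
      (fun ts s =>
        let j := PySem.Chars.findFrom L ['\n'] s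
        if j ≠ -1 then ts ++ [String.mk (PySem.Chars.slice L (some s) (some j))] else ts) []
  (titles, start, PySem.List.slice start (some 1) none ++ [(n : Int) - 1])

-- ===== PRECONDITION & SPEC =====
def Spec_parse (txt : String) (out : List String × List Int × List Int) : Prop := out = parse_alt txt
instance (txt : String) (out : List String × List Int × List Int) : Decidable (Spec_parse txt out) := by unfold Spec_parse; infer_instance

-- ===== CLAIM (what is proved, stated in full; the proofs are below) =====
def Claim_equal_parse : Prop := ∀ (txt : String), Dom_parse txt → Spec_parse txt (parse txt)

-- ===== LEMMAS AND PROOFS =====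

-- A's for-loop as a structural recursion over the remaining characters, carrying the position
def goA (cs : List Char) (p : Nat) (st : List (List Char) × List Int × Int × Int × List Char) :
    List (List Char) × List Int × Int × Int × List Char :=
  match cs with
  | [] => st
  | c :: cs => goA cs (p + 1) (parseStep st (p : Int) c)

-- the title B extracts for one start position (0 or 1 element)
def tpart (L : List Char) (s : Int) : List (List Char) :=
  if PySem.Chars.findFrom L ['\n'] s ≠ -1 then
    [PySem.Chars.slice L (some s) (some (PySem.Chars.findFrom L ['\n'] s))]
  else []

-- bridge: A's foldl over pyRange = goA over the dropped suffix
theorem bridgeA (L : List Char) : ∀ (N p : Nat), L.length ≤ p + N →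
    ∀ st, (PySem.List.pyRange (p : Int) (L.length : Int)).foldl
        (fun st i => parseStep st i (PySem.List.pyGetD L i ' ')) st = goA (L.drop p) p st := by
  intro N
  induction N with
  | zero =>
    intro p hp st
    rw [PySem.List.pyRange_one_eq_nil (by exact_mod_cast hp), List.drop_eq_nil_of_le (by omega)]
    rfl
  | succ N ih =>
    intro p hp st
    rcases Nat.lt_or_ge p L.length with hlt | hge
    · rw [PySem.List.pyRange_one_cons (by exact_mod_cast hlt)]
      rw [List.foldl_cons]
      rw [show ((p : Int) + 1) = ((p + 1 : Nat) : Int) by push_cast; ring]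
      rw [ih (p + 1) (by omega)]
      rw [List.drop_eq_getElem_cons hlt]
      rw [goA]
      rw [PySem.List.pyGetD_eq_getElem L ' ' (by omega) (by exact_mod_cast hlt)]
      simp
    · rw [PySem.List.pyRange_one_eq_nil (by exact_mod_cast hge), List.drop_eq_nil_of_le (by omega)]
      rfl

-- findFrom returns -1 iff no occurrence at or after j
theorem ff_none (L sub : List Char) (j : Nat)
    (h : ∀ k, j ≤ k → ¬ sub <+: L.drop k) :
    PySem.Chars.findFrom L sub (j : Int) = -1 := by
  rcases Nat.lt_or_ge L.length j with hj2 | hj2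
  · exact findFrom_of_gt L sub j hj2
  · rw [PySem.Chars.findFrom_natCast_eq_neg_one_iff L sub j hj2]
    intro hinf
    obtain ⟨i, hi⟩ := (PySem.Chars.exists_prefix_drop_iff_isIn sub (L.drop j)).2
      ((PySem.Chars.isIn_iff_infix sub (L.drop j)).2 hinf)
    rw [List.drop_drop] at hi
    exact h (j + i) (by omega) hi

-- findFrom finds the first occurrence
theorem ff_first (L sub : List Char) (j k : Nat) (hjk : j ≤ k) (hocc : sub <+: L.drop k)
    (hs : sub ≠ []) (hmin : ∀ m, j ≤ m → m < k → ¬ sub <+: L.drop m) :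
    PySem.Chars.findFrom L sub (j : Int) = (k : Int) := by
  have hkn : k < L.length := by
    rcases Nat.lt_or_ge k L.length with h' | h'
    · exact h'
    · rw [List.drop_eq_nil_of_le h'] at hocc
      exact absurd (List.prefix_nil.1 hocc) hs
  have hjn : j ≤ L.length := by omega
  rw [PySem.Chars.findFrom_natCast L sub j hjn]
  have hpre : sub <+: (L.drop j).drop (k - j) := by
    rw [List.drop_drop, show j + (k - j) = k by omega]; exact hocc
  have hinf : sub <:+: L.drop j :=
    (PySem.Chars.isIn_iff_infix sub (L.drop j)).1
      ((PySem.Chars.exists_prefix_drop_iff_isIn sub (L.drop j)).1 ⟨k - j, hpre⟩)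
  have hr0 : 0 ≤ PySem.Chars.find (L.drop j) sub :=
    (PySem.Chars.find_nonneg_iff (L.drop j) sub).2 hinf
  obtain ⟨hrp, hrmin⟩ := PySem.Chars.find_spec hr0
  set r := PySem.Chars.find (L.drop j) sub with hrdef
  rw [List.drop_drop] at hrp
  have h1 : k ≤ j + r.toNat := by
    by_contra hcon
    exact hmin (j + r.toNat) (by omega) (by omega) hrp
  have h2 : r.toNat ≤ k - j := by
    by_contra hcon
    exact hrmin (k - j) (by omega) hpre
  rw [if_neg (by omega)]
  omega

theorem occ1_iff (L : List Char) (k : Nat) : ['\n'] <+: L.drop k ↔ L[k]? = some '\n' := by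
  rw [List.prefix_iff_getElem?]
  constructor
  · intro h; simpa using h 0 (by simp)
  · intro h i hi
    simp only [List.length_singleton] at hi
    interval_cases i
    simpa using h

theorem occ3_iff (L : List Char) (k : Nat) :
    ['\n', '\n', '\n'] <+: L.drop k ↔
      L[k]? = some '\n' ∧ L[k + 1]? = some '\n' ∧ L[k + 2]? = some '\n' := by
  rw [List.prefix_iff_getElem?]
  constructor
  · intro h
    refine ⟨?_, ?_, ?_⟩
    · simpa using h 0 (by simp)
    · simpa using h 1 (by simp)
    · simpa using h 2 (by simp)
  · rintro ⟨h0, h1, h2⟩ i hi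
    have hi3 : i < 3 := by simpa using hi
    interval_cases i <;> simpa using by assumption

theorem occ3_len (L : List Char) (k : Nat) (h : ['\n', '\n', '\n'] <+: L.drop k) :
    k + 3 ≤ L.length := by
  have hl := h.length_le
  simp only [List.length_drop, List.length_cons] at hl
  rcases Nat.lt_or_ge k L.length with h' | h'
  · omega
  · rw [List.drop_eq_nil_of_le h'] at h; simp at h

theorem loopB_nil (L : List Char) (j : Nat) (h : ∀ k, j ≤ k → ¬ ['\n', '\n', '\n'] <+: L.drop k) :
    loopB L j = [] := by
  rw [loopB]
  simp [ff_none L ['\n', '\n', '\n'] j h]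

theorem loopB_found (L : List Char) (j k : Nat) (hjk : j ≤ k)
    (hocc : ['\n', '\n', '\n'] <+: L.drop k)
    (hmin : ∀ m, j ≤ m → m < k → ¬ ['\n', '\n', '\n'] <+: L.drop m) :
    loopB L j = ((k + 3 : Nat) : Int) :: loopB L (skipNl L (k + 3)) := by
  rw [loopB]
  have hf := ff_first L ['\n', '\n', '\n'] j k hjk hocc (by simp) hmin
  rw [hf]
  rw [dif_neg (by omega)]
  norm_num

theorem loopB_congr (L : List Char) (a b : Nat) (hab : a ≤ b)
    (h : ∀ m, a ≤ m → m < b → ¬ ['\n', '\n', '\n'] <+: L.drop m) :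
    loopB L a = loopB L b := by
  by_cases H : ∃ k, b ≤ k ∧ ['\n', '\n', '\n'] <+: L.drop k
  · have hk0 := Nat.find_spec H
    rw [loopB_found L a (Nat.find H) (by omega) hk0.2 ?_,
        loopB_found L b (Nat.find H) hk0.1 hk0.2 ?_]
    · intro m hbm hmk
      exact fun hp => Nat.find_min H hmk ⟨hbm, hp⟩
    · intro m ham hmk
      rcases Nat.lt_or_ge m b with hmb | hmb
      · exact h m ham hmb
      · exact fun hp => Nat.find_min H hmk ⟨hmb, hp⟩
  · rw [loopB_nil L a ?_, loopB_nil L b ?_]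
    · intro k hbk hp
      exact H ⟨k, hbk, hp⟩
    · intro k hak hp
      rcases Nat.lt_or_ge k b with hkb | hkb
      · exact h k hak hkb hp
      · exact H ⟨k, hkb, hp⟩

theorem skipNl_nonnl (L : List Char) (j : Nat) (h : j < L.length) (hc : L[j] ≠ '\n') :
    skipNl L j = j := by
  rw [skipNl]; rw [dif_pos h, if_neg hc]

theorem skipNl_step (L : List Char) (j : Nat) (h : j < L.length) (hc : L[j] = '\n') :
    skipNl L j = skipNl L (j + 1) := by
  rw [skipNl]; rw [dif_pos h, if_pos hc]

-- parseStep, reduced in each of the situations the simulation meets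
theorem ps_eq_nn (ts : List (List Char)) (ss : List Int) (cnt : Int) (str : List Char)
    (i : Int) (c : Char) (hc : c ≠ '\n') :
    parseStep (ts, ss, cnt, 0, str) i c = (ts, ss, 0, 0, str) := by
  simp [parseStep, hc]

theorem ps_eq_nl (ts : List (List Char)) (ss : List Int) (cnt : Int) (str : List Char)
    (i : Int) (h3 : cnt + 1 ≠ 3) :
    parseStep (ts, ss, cnt, 0, str) i '\n' = (ts, ss, cnt + 1, 0, str) := by
  simp [parseStep, h3]

theorem ps_eq_trip (ts : List (List Char)) (ss : List Int) (cnt : Int) (str : List Char)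
    (i : Int) (h3 : cnt + 1 = 3) :
    parseStep (ts, ss, cnt, 0, str) i '\n' = (ts, ss ++ [i + 1], 3, 1, str) := by
  simp [parseStep, h3]

theorem ps_tit_nn (ts : List (List Char)) (ss : List Int) (cnt : Int) (str : List Char)
    (i : Int) (c : Char) (hc : c ≠ '\n') :
    parseStep (ts, ss, cnt, 1, str) i c = (ts, ss, 0, 1, str ++ [c]) := by
  simp [parseStep, hc]

theorem ps_tit_nl (ts : List (List Char)) (ss : List Int) (cnt : Int) (str : List Char)
    (i : Int) (h3 : cnt + 1 ≠ 3) :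
    parseStep (ts, ss, cnt, 1, str) i '\n' = (ts ++ [str], ss, cnt + 1, 0, []) := by
  simp [parseStep, h3]

-- terminal case of the simulation: nothing remains to scan
theorem masterTerm (L : List Char) (p : Nat) (hp : L.length ≤ p) :
    ((∀ (c : Nat) ts ss, p ≤ L.length → c ≤ 2 → c ≤ p →
      (∀ m, p - c ≤ m → m < p → L[m]? = some '\n') →
      (c < p → ¬ L[p - c - 1]? = some '\n') →
      (goA (L.drop p) p (ts, ss, (c : Int), 0, [])).1 =
          ts ++ (loopB L (p - c)).flatMap (tpart L) ∧
      (goA (L.drop p) p (ts, ss, (c : Int), 0, [])).2.1 = ss ++ loopB L (p - c)) ∧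
    (∀ (c : Int) ts ss, p ≤ L.length → 3 ≤ c →
      (goA (L.drop p) p (ts, ss, c, 0, [])).1 =
          ts ++ (loopB L (skipNl L p)).flatMap (tpart L) ∧
      (goA (L.drop p) p (ts, ss, c, 0, [])).2.1 = ss ++ loopB L (skipNl L p)) ∧
    (∀ (s : Nat) ts ss, p ≤ L.length → s ≤ p →
      (∀ m, s ≤ m → m < p → ¬ L[m]? = some '\n') →
      (goA (L.drop p) p
          (ts, ss, (if p = s then (3 : Int) else 0), 1, (L.drop s).take (p - s))).1 =
          ts ++ tpart L (s : Int) ++ (loopB L (skipNl L s)).flatMap (tpart L) ∧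
      (goA (L.drop p) p
          (ts, ss, (if p = s then (3 : Int) else 0), 1, (L.drop s).take (p - s))).2.1 =
          ss ++ loopB L (skipNl L s))) := by
  have hdrop : L.drop p = [] := List.drop_eq_nil_of_le hp
  refine ⟨?_, ?_, ?_⟩
  · intro c ts ss hpl hc2 hcp H1 H2
    have hB : loopB L (p - c) = [] := by
      apply loopB_nil
      intro k hk hpre
      have := occ3_len L k hpre
      omega
    rw [hdrop, hB]
    simp [goA]
  · intro c ts ss hpl hc3
    have hB : loopB L (skipNl L p) = [] := by
      apply loopB_nil
      intro k hk hpre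
      have := occ3_len L k hpre
      have := skipNl_ge L p
      omega
    rw [hdrop, hB]
    simp [goA]
  · intro s ts ss hpl hsp hns
    have hnone : ∀ k, s ≤ k → ¬ (['\n'] : List Char) <+: L.drop k := by
      intro k hk hpre
      rw [occ1_iff] at hpre
      have hklt : k < L.length := by
        rcases Nat.lt_or_ge k L.length with h' | h'
        · exact h'
        · rw [List.getElem?_eq_none (by omega)] at hpre; exact absurd hpre (by simp)
      exact hns k hk (by omega) hpre
    have htp : tpart L (s : Int) = [] := by
      rw [tpart, if_neg]
      simp only [ne_eq, not_not]
      exact ff_none L ['\n'] s hnone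
    have hB : loopB L (skipNl L s) = [] := by
      apply loopB_nil
      intro k hk hpre
      have hocc1 : (['\n'] : List Char) <+: L.drop k := by
        rw [occ1_iff]
        exact ((occ3_iff L k).1 hpre).1
      have := skipNl_ge L s
      exact hnone k (by omega) hocc1
    rw [hdrop, htp, hB]
    simp [goA]

-- the three simulation modes, proved together by induction on the remaining length:
-- mode EQ  : normal scanning, count = c ≤ 2 = length of the newline run ending just before p
-- mode RUN : inside a newline run that has already produced a start (count ≥ 3)
-- mode TIT : title mode, collecting characters since position s
theorem master (L : List Char) : ∀ (N : Nat), ∀ p, L.length ≤ p + N →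
    ((∀ (c : Nat) ts ss, p ≤ L.length → c ≤ 2 → c ≤ p →
      (∀ m, p - c ≤ m → m < p → L[m]? = some '\n') →
      (c < p → ¬ L[p - c - 1]? = some '\n') →
      (goA (L.drop p) p (ts, ss, (c : Int), 0, [])).1 =
          ts ++ (loopB L (p - c)).flatMap (tpart L) ∧
      (goA (L.drop p) p (ts, ss, (c : Int), 0, [])).2.1 = ss ++ loopB L (p - c)) ∧
    (∀ (c : Int) ts ss, p ≤ L.length → 3 ≤ c →
      (goA (L.drop p) p (ts, ss, c, 0, [])).1 =
          ts ++ (loopB L (skipNl L p)).flatMap (tpart L) ∧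
      (goA (L.drop p) p (ts, ss, c, 0, [])).2.1 = ss ++ loopB L (skipNl L p)) ∧
    (∀ (s : Nat) ts ss, p ≤ L.length → s ≤ p →
      (∀ m, s ≤ m → m < p → ¬ L[m]? = some '\n') →
      (goA (L.drop p) p
          (ts, ss, (if p = s then (3 : Int) else 0), 1, (L.drop s).take (p - s))).1 =
          ts ++ tpart L (s : Int) ++ (loopB L (skipNl L s)).flatMap (tpart L) ∧
      (goA (L.drop p) p
          (ts, ss, (if p = s then (3 : Int) else 0), 1, (L.drop s).take (p - s))).2.1 =
          ss ++ loopB L (skipNl L s))) := by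
  intro N
  induction N with
  | zero =>
    intro p hp
    exact masterTerm L p (by omega)
  | succ N ih =>
    intro p hp
    rcases Nat.lt_or_ge p L.length with hpn | hpn
    case inr => exact masterTerm L p hpn
    have hsome : ∀ (h : L[p] = '\n'), L[p]? = some '\n' := fun h => by
      rw [List.getElem?_eq_getElem hpn, h]
    have hdrop : L.drop p = L[p] :: L.drop (p + 1) := List.drop_eq_getElem_cons hpn
    refine ⟨?_, ?_, ?_⟩
    -- ===== mode EQ =====
    · intro c ts ss hpl hc2 hcp H1 H2
      rw [hdrop, goA]
      by_cases hnl : L[p] = '\n'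
      · by_cases hc : c = 2
        · -- the run reaches length 3: a start is recorded, title mode begins
          rw [hnl, ps_eq_trip ts ss (c : Int) [] (p : Int) (by omega)]
          rw [show p - c = p - 2 by omega] at *
          have hT := ((ih (p + 1) (by omega)).2.2) (p + 1) ts (ss ++ [(p : Int) + 1])
            (by omega) (le_refl _) (by omega)
          rw [if_pos rfl, Nat.sub_self, List.take_zero] at hT
          obtain ⟨e1, e2⟩ := hT
          have hocc3 : ['\n', '\n', '\n'] <+: L.drop (p - 2) := by
            rw [occ3_iff]
            refine ⟨H1 (p - 2) (by omega) (by omega), ?_, ?_⟩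
            · rw [show p - 2 + 1 = p - 1 by omega]
              exact H1 (p - 1) (by omega) (by omega)
            · rw [show p - 2 + 2 = p by omega]
              exact hsome hnl
          have hB := loopB_found L (p - 2) (p - 2) (le_refl _) hocc3 (by omega)
          rw [show p - 2 + 3 = p + 1 by omega] at hB
          rw [hB]
          constructor
          · rw [e1, List.flatMap_cons]
            simp [List.append_assoc]
          · rw [e2]
            have : ((p + 1 : Nat) : Int) = (p : Int) + 1 := by push_cast; ring
            simp [this, List.append_assoc]
        · -- the run is still short: just count
          rw [hnl, ps_eq_nl ts ss (c : Int) [] (p : Int) (by omega)]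
          rw [show ((c : Int) + 1) = ((c + 1 : Nat) : Int) by push_cast; ring]
          have hE := ((ih (p + 1) (by omega)).1) (c + 1) ts ss (by omega) (by omega) (by omega)
            (by
              intro m hm1 hm2
              rcases Nat.lt_or_ge m p with hmp | hmp
              · exact H1 m (by omega) hmp
              · rw [show m = p by omega]
                exact hsome hnl)
            (by
              intro hlt
              rw [show p + 1 - (c + 1) - 1 = p - c - 1 by omega]
              exact H2 (by omega))
          rw [show p + 1 - (c + 1) = p - c by omega] at hE
          exact hE
      · -- run broken: count resets
        rw [ps_eq_nn ts ss (c : Int) [] (p : Int) L[p] hnl]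
        have hE := ((ih (p + 1) (by omega)).1) 0 ts ss (by omega) (by omega) (by omega)
          (by intro m hm1 hm2; omega)
          (by
            intro hlt
            rw [show p + 1 - 0 - 1 = p by omega]
            intro hcon
            rw [List.getElem?_eq_getElem hpn] at hcon
            exact hnl (by simpa using hcon))
        have hcongr : loopB L (p - c) = loopB L (p + 1) := by
          apply loopB_congr L (p - c) (p + 1) (by omega)
          intro m hm1 hm2 hpre
          rw [occ3_iff] at hpre
          obtain ⟨o0, o1, o2⟩ := hpre
          have hval : L[p]? = some '\n' := by
            have hpm : p = m ∨ p = m + 1 ∨ p = m + 2 := by omega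
            rcases hpm with h | h | h
            · rw [h]; exact o0
            · rw [h]; exact o1
            · rw [h]; exact o2
          rw [List.getElem?_eq_getElem hpn] at hval
          exact hnl (by simpa using hval)
        rw [hcongr]
        rw [show p + 1 - 0 = p + 1 by omega] at hE
        exact hE
    -- ===== mode RUN =====
    · intro c ts ss hpl hc3
      rw [hdrop, goA]
      by_cases hnl : L[p] = '\n'
      · rw [hnl, ps_eq_nl ts ss c [] (p : Int) (by omega)]
        have hR := ((ih (p + 1) (by omega)).2.1) (c + 1) ts ss (by omega) (by omega)
        rw [skipNl_step L p hpn hnl]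
        exact hR
      · rw [ps_eq_nn ts ss c [] (p : Int) L[p] hnl]
        have hE := ((ih (p + 1) (by omega)).1) 0 ts ss (by omega) (by omega) (by omega)
          (by intro m hm1 hm2; omega)
          (by
            intro hlt
            rw [show p + 1 - 0 - 1 = p by omega]
            intro hcon
            rw [List.getElem?_eq_getElem hpn] at hcon
            exact hnl (by simpa using hcon))
        rw [show p + 1 - 0 = p + 1 by omega, show ((0 : Nat) : Int) = (0 : Int) by norm_num] at hE
        have hskip : skipNl L p = p := skipNl_nonnl L p hpn hnl
        have hcongr : loopB L p = loopB L (p + 1) := by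
          apply loopB_congr L p (p + 1) (by omega)
          intro m hm1 hm2 hpre
          rw [show m = p by omega, occ3_iff] at hpre
          rw [List.getElem?_eq_getElem hpn] at hpre
          exact hnl (by simpa using hpre.1)
        rw [hskip, hcongr]
        exact hE
    -- ===== mode TIT =====
    · intro s ts ss hpl hsp hns
      rw [hdrop, goA]
      by_cases hnl : L[p] = '\n'
      · -- the title ends here
        rw [hnl, ps_tit_nl ts ss _ _ (p : Int)
          (by by_cases h : p = s <;> simp [h])]
        by_cases hps : p = s
        · -- empty title: the newline run goes on
          subst hps
          rw [if_pos rfl, Nat.sub_self, List.take_zero]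
          have hR := ((ih (p + 1) (by omega)).2.1) (3 + 1) (ts ++ [([] : List Char)]) ss
            (by omega) (by omega)
          have htp : tpart L (p : Int) = [([] : List Char)] := by
            have hf : PySem.Chars.findFrom L ['\n'] (p : Int) = (p : Int) :=
              ff_first L ['\n'] p p (le_refl _) (by rw [occ1_iff]; exact hsome hnl)
                (by simp) (by omega)
            rw [tpart, if_pos (by rw [hf]; omega), hf]
            rw [PySem.Chars.slice_eq_listSlice, PySem.List.slice_natCast]
            simp
          rw [skipNl_step L p hpn hnl]
          rw [htp]
          obtain ⟨e1, e2⟩ := hR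
          exact ⟨e1, e2⟩
        · -- nonempty title body ended: back to normal mode with count 1
          rw [if_neg hps]
          have hspl : s < p := by omega
          rw [show (0 : Int) + 1 = ((1 : Nat) : Int) by norm_num]
          have hE := ((ih (p + 1) (by omega)).1) 1 (ts ++ [(L.drop s).take (p - s)]) ss
            (by omega) (by omega) (by omega)
            (by
              intro m hm1 hm2
              rw [show m = p by omega]
              exact hsome hnl)
            (by
              intro hlt
              rw [show p + 1 - 1 - 1 = p - 1 by omega]
              exact hns (p - 1) (by omega) (by omega))
          rw [show p + 1 - 1 = p by omega] at hE
          have hsn : s < L.length := by omega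
          have hLs : L[s] ≠ '\n' := by
            intro hcon
            exact hns s (le_refl _) hspl (by rw [List.getElem?_eq_getElem hsn, hcon])
          have hskip : skipNl L s = s := skipNl_nonnl L s hsn hLs
          have hcongr : loopB L s = loopB L p := by
            apply loopB_congr L s p (by omega)
            intro m hm1 hm2 hpre
            rw [occ3_iff] at hpre
            exact hns m hm1 hm2 hpre.1
          have htp : tpart L (s : Int) = [(L.drop s).take (p - s)] := by
            have hf : PySem.Chars.findFrom L ['\n'] (s : Int) = (p : Int) :=
              ff_first L ['\n'] s p (by omega) (by rw [occ1_iff]; exact hsome hnl)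
                (by simp)
                (by
                  intro m hm1 hm2
                  rw [occ1_iff]
                  exact hns m hm1 hm2)
            rw [tpart, if_pos (by rw [hf]; omega), hf]
            rw [PySem.Chars.slice_eq_listSlice, PySem.List.slice_natCast]
          rw [hskip, hcongr, htp]
          obtain ⟨e1, e2⟩ := hE
          exact ⟨e1, e2⟩
      · -- still inside the title: collect the character
        rw [ps_tit_nn ts ss _ _ (p : Int) L[p] hnl]
        have hT := ((ih (p + 1) (by omega)).2.2) s ts ss (by omega) (by omega)
          (by
            intro m hm1 hm2
            rcases Nat.lt_or_ge m p with hmp | hmp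
            · exact hns m hm1 hmp
            · rw [show m = p by omega]
              intro hcon
              rw [List.getElem?_eq_getElem hpn] at hcon
              exact hnl (by simpa using hcon))
        rw [if_neg (by omega)] at hT
        have hstr : (L.drop s).take (p + 1 - s) = (L.drop s).take (p - s) ++ [L[p]] := by
          rw [show p + 1 - s = (p - s) + 1 by omega, List.take_succ]
          congr 1
          rw [List.getElem?_drop]
          rw [show s + (p - s) = p by omega]
          rw [List.getElem?_eq_getElem hpn]
          rfl
        rw [hstr] at hT
        exact hT

-- B's title-building fold, characterised
theorem foldTitles (L : List Char) : ∀ (ss : List Int) (acc : List String),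
    ss.foldl (fun ts s =>
        let j := PySem.Chars.findFrom L ['\n'] s
        if j ≠ -1 then ts ++ [String.mk (PySem.Chars.slice L (some s) (some j))] else ts) acc =
      acc ++ (ss.flatMap (tpart L)).map (fun l => String.mk l) := by
  intro ss
  induction ss with
  | nil => intro acc; simp
  | cons s ss ih =>
    intro acc
    rw [List.foldl_cons, List.flatMap_cons, ih]
    by_cases h : PySem.Chars.findFrom L ['\n'] s ≠ -1
    · simp [tpart, h]
    · simp [tpart, h]

-- A's trailing while-loop drops the first c elements
theorem parseWhile_eq (ss : List Int) : ∀ (c : Int) (acc : List Int), 0 ≤ c →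
    parseWhile ss c (ss.length : Int) acc = acc ++ ss.drop c.toNat := by
  intro c acc hc
  rw [parseWhile]
  by_cases h : c < (ss.length : Int)
  · rw [if_pos h]
    have hlt : c.toNat < ss.length := by omega
    rw [parseWhile_eq ss (c + 1) _ (by omega)]
    rw [PySem.List.pyGetD_eq_getElem ss 0 hc (by omega)]
    rw [show (c + 1).toNat = c.toNat + 1 by omega, List.drop_eq_getElem_cons hlt]
    simp
  · rw [if_neg h]
    rw [List.drop_eq_nil_of_le (by omega)]
    simp
termination_by c => (ss.length - c.toNat : Nat)
decreasing_by omega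

-- ===== VERDICT (by name: the statement is the Claim_ definition above) =====
theorem parse_spec : Claim_equal_parse := by
  unfold Claim_equal_parse
  intro txt _
  unfold Spec_parse parse parse_alt
  simp only []
  have hbr := bridgeA txt.toList txt.toList.length 0 (by omega) ([], [], 0, 0, [])
  rw [Nat.cast_zero, List.drop_zero] at hbr
  rw [hbr]
  have hM := (master txt.toList txt.toList.length 0 (by omega)).1 0 [] []
    (by omega) (by omega) (by omega)
    (by intro m h1 h2; omega)
    (by intro h; exact absurd h (Nat.lt_irrefl 0))
  rw [Nat.cast_zero, List.drop_zero, Nat.sub_zero] at hM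
  obtain ⟨e1, e2⟩ := hM
  rw [List.nil_append] at e1 e2
  rw [e1, e2]
  have hft := foldTitles txt.toList (loopB txt.toList 0) []
  simp only [] at hft
  rw [hft, List.nil_append]
  have hpw := parseWhile_eq (loopB txt.toList 0) 1 [] (by omega)
  rw [List.nil_append, show (1 : Int).toNat = 1 by norm_num, List.drop_one] at hpw
  rw [hpw, PySem.List.slice_from_one]
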